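-- pv_equiv track=rewrite | github.com/tjwjy/Model_python | model_Inter2/Environment.py | get_simple_grid
-- ===== SOURCE A (Python) =====
-- def get_simple_grid(dimenssionX,dimenssionY):
--     L_Place = []
--     tag = 0
--     for i in range(1, dimenssionX + 1):
--         for j in range(1, dimenssionY + 1):
--             L_Place.append([i, j, tag])
--             tag = tag + 1
--     return L_Place
-- ===== SOURCE B (Python) =====
-- def get_simple_grid(dimenssionX, dimenssionY):
--     # Single flat loop over the tag itself; coordinates recovered by divmod.
--     if dimenssionX <= 0 or dimenssionY <= 0:
--         return []
--     out = []
--     for tag in range(dimenssionX * dimenssionY):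
--         i, j = divmod(tag, dimenssionY)
--         out.append([i + 1, j + 1, tag])
--     return out
-- ===== Notes on version B (the rewrite author's own statement) =====
-- stated objective: alternative
-- what changed: Replaces the nested coordinate loops with a running tag counter by a single flat loop over the tag range(X*Y), recovering the coordinates from the tag with divmod.
import Mathlib
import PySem

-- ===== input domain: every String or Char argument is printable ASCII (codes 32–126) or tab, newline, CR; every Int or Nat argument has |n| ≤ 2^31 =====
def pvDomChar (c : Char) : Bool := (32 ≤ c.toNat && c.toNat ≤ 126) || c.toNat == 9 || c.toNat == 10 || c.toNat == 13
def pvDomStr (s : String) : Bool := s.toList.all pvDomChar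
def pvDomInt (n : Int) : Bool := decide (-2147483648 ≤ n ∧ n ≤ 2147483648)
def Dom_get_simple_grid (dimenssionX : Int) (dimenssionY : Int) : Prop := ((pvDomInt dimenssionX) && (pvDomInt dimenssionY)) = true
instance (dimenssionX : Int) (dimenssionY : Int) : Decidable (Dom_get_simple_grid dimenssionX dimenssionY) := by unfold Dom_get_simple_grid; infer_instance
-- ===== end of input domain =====

-- B replaces A's nested coordinate loops threading a running tag counter by a single flat
-- loop over the tag range(X*Y), recovering the coordinates from the tag with divmod.

-- ===== PORT A =====
def get_simple_grid (dimenssionX : Int) (dimenssionY : Int) : List (List Int) :=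
  ((PySem.List.pyRange 1 (dimenssionX + 1) 1).foldl
    (fun (st : List (List Int) × Int) i =>
      (PySem.List.pyRange 1 (dimenssionY + 1) 1).foldl
        (fun st j => (st.1 ++ [[i, j, st.2]], st.2 + 1)) st)
    ([], 0)).1

-- ===== PORT B =====
def get_simple_grid_alt (dimenssionX : Int) (dimenssionY : Int) : List (List Int) :=
  if dimenssionX ≤ 0 || dimenssionY ≤ 0 then []
  else
    (PySem.List.pyRange 0 (dimenssionX * dimenssionY) 1).foldl
      (fun out tag =>
        out ++ [[PySem.Int.floordiv tag dimenssionY + 1,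
                 PySem.Int.mod tag dimenssionY + 1, tag]]) []

-- ===== PRECONDITION & SPEC =====
def Spec_get_simple_grid (dimenssionX : Int) (dimenssionY : Int) (out : List (List Int)) : Prop := out = get_simple_grid_alt dimenssionX dimenssionY
instance (dimenssionX : Int) (dimenssionY : Int) (out : List (List Int)) : Decidable (Spec_get_simple_grid dimenssionX dimenssionY out) := by unfold Spec_get_simple_grid; infer_instance

-- ===== CLAIM =====
def Claim_equal_get_simple_grid : Prop := ∀ (dimenssionX : Int) (dimenssionY : Int), Dom_get_simple_grid dimenssionX dimenssionY → Spec_get_simple_grid dimenssionX dimenssionY (get_simple_grid dimenssionX dimenssionY)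

-- ===== LEMMAS AND PROOFS =====

-- Inner loop of A: appending row cells [i, j, tag] while threading the counter.
theorem pv_inner (i : Int) : ∀ (n : Nat) (a t : Int) (L : List (List Int)),
    (PySem.List.pyRange a (a + n) 1).foldl
      (fun (st : List (List Int) × Int) j => (st.1 ++ [[i, j, st.2]], st.2 + 1)) (L, t)
    = (L ++ (PySem.List.pyRange a (a + n) 1).map (fun j => [i, j, t + (j - a)]), t + n) := by
  intro n
  induction n with
  | zero =>
      intro a t L
      rw [PySem.List.pyRange_one_eq_nil (by omega)]
      simp
  | succ m ih =>
      intro a t L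
      rw [PySem.List.pyRange_one_cons (by omega : a < a + (m + 1 : Nat))]
      simp only [List.foldl_cons, List.map_cons]
      have hb : a + ((m : Nat) + 1 : Nat) = (a + 1) + (m : Nat) := by push_cast; ring
      rw [hb, ih (a + 1) (t + 1) (L ++ [[i, a, t]])]
      have hf : (fun j => [i, j, t + 1 + (j - (a + 1))]) = (fun j : Int => [i, j, t + (j - a)]) := by
        funext j; simp; ring
      rw [hf]
      simp only [Prod.mk.injEq]
      refine ⟨by simp, by push_cast; ring⟩

-- Outer loop of A for a positive Y: each row starts where the previous counter ended.
theorem pv_outer (Y : Int) (hY : 0 < Y) : ∀ (m : Nat) (x t : Int) (L : List (List Int)),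
    (PySem.List.pyRange x (x + m) 1).foldl
      (fun (st : List (List Int) × Int) i =>
        (PySem.List.pyRange 1 (Y + 1) 1).foldl
          (fun st j => (st.1 ++ [[i, j, st.2]], st.2 + 1)) st) (L, t)
    = (L ++ (PySem.List.pyRange x (x + m) 1).flatMap
        (fun i => (PySem.List.pyRange 1 (Y + 1) 1).map
          (fun j => [i, j, t + (i - x) * Y + (j - 1)])), t + m * Y) := by
  intro m
  induction m with
  | zero =>
      intro x t L
      have h0 : PySem.List.pyRange x (x + ((0:Nat):Int)) 1 = [] :=
        PySem.List.pyRange_one_eq_nil (by omega)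
      rw [h0]
      simp
  | succ m ih =>
      intro x t L
      rw [PySem.List.pyRange_one_cons (by omega : x < x + (m + 1 : Nat))]
      simp only [List.foldl_cons, List.flatMap_cons]
      have hY1 : Y + 1 = 1 + (Y.toNat : Nat) := by omega
      rw [hY1, pv_inner]
      rw [← hY1]
      have hb : x + ((m : Nat) + 1 : Nat) = (x + 1) + (m : Nat) := by push_cast; ring
      rw [hb, ih (x + 1) (t + (Y.toNat : Nat)) (L ++ (PySem.List.pyRange 1 (Y + 1) 1).map fun j => [x, j, t + (j - 1)])]
      have htY : (t + (Y.toNat : Nat) : Int) = t + Y := by omega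
      rw [htY]
      have hf : (fun i => (PySem.List.pyRange 1 (Y + 1) 1).map
            (fun j => [i, j, t + Y + (i - (x + 1)) * Y + (j - 1)]))
          = (fun i : Int => (PySem.List.pyRange 1 (Y + 1) 1).map
            (fun j => [i, j, t + (i - x) * Y + (j - 1)])) := by
        funext i
        apply List.map_congr_left
        intro j _
        have : t + Y + (i - (x + 1)) * Y = t + (i - x) * Y := by ring
        rw [this]
      rw [hf]
      simp only [Prod.mk.injEq]
      constructor
      · rw [List.append_assoc]
        have hx : (fun j : Int => [x, j, t + (x - x) * Y + (j - 1)])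
            = (fun j : Int => [x, j, t + (j - 1)]) := by
          funext j; norm_num
        rw [hx]
      · push_cast; ring

-- B's flat fold is the map of its cell function over the tag range.
theorem pv_flat_map (Y : Int) (xs : List Int) (L : List (List Int)) :
    xs.foldl (fun out tag =>
        out ++ [[PySem.Int.floordiv tag Y + 1, PySem.Int.mod tag Y + 1, tag]]) L
    = L ++ xs.map (fun tag =>
        [PySem.Int.floordiv tag Y + 1, PySem.Int.mod tag Y + 1, tag]) := by
  induction xs generalizing L with
  | nil => simp
  | cons a as ih => simp [ih, List.append_assoc]

-- The flat tag enumeration equals the row-by-row closed form.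
theorem pv_flat (Y : Int) (hY : 0 < Y) : ∀ (m : Nat),
    (PySem.List.pyRange 0 (m * Y) 1).map (fun tag =>
        [PySem.Int.floordiv tag Y + 1, PySem.Int.mod tag Y + 1, tag])
    = (PySem.List.pyRange 1 (1 + m) 1).flatMap
        (fun i => (PySem.List.pyRange 1 (Y + 1) 1).map
          (fun j => [i, j, (i - 1) * Y + (j - 1)])) := by
  intro m
  induction m with
  | zero =>
      have ha : PySem.List.pyRange 0 (((0 : Nat) : Int) * Y) 1 = [] :=
        PySem.List.pyRange_one_eq_nil (by push_cast; nlinarith)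
      have hb : PySem.List.pyRange 1 (1 + ((0 : Nat) : Int)) 1 = [] :=
        PySem.List.pyRange_one_eq_nil (by norm_num)
      rw [ha, hb]
      simp
  | succ m ih =>
      have hsplit : PySem.List.pyRange 0 (((m + 1 : Nat)) * Y) 1
          = PySem.List.pyRange 0 (m * Y) 1 ++ PySem.List.pyRange (m * Y) ((m + 1 : Nat) * Y) 1 := by
        apply PySem.List.pyRange_one_append
        · positivity
        · push_cast; nlinarith
      rw [hsplit, List.map_append, ih]
      have houter : PySem.List.pyRange 1 (1 + ((m + 1 : Nat) : Int)) 1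
          = PySem.List.pyRange 1 (1 + m) 1 ++ [1 + (m : Int)] := by
        have h : (1 : Int) + ((m + 1 : Nat) : Int) = (1 + (m : Int)) + 1 := by push_cast; ring
        rw [h, PySem.List.pyRange_one_succ_right (by omega)]
      rw [houter, List.flatMap_append]
      congr 1
      simp only [List.flatMap_cons, List.flatMap_nil, List.append_nil]
      -- last block: tags m*Y … m*Y+Y-1 give row i = m+1
      have hrow : PySem.List.pyRange ((m : Int) * Y) ((m + 1 : Nat) * Y) 1
          = (PySem.List.pyRange 1 (Y + 1) 1).map (fun j => (m : Int) * Y + (j - 1)) := by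
        rw [PySem.List.pyRange_one, PySem.List.pyRange_one]
        have h1 : (((m + 1 : Nat) : Int) * Y - (m : Int) * Y).toNat = Y.toNat := by
          have h : (((m + 1 : Nat) : Int) * Y - (m : Int) * Y) = Y := by push_cast; ring
          rw [h]
        have h2 : ((Y + 1) - 1).toNat = Y.toNat := by omega
        rw [h1, h2, List.map_map]
        apply List.map_congr_left
        intro k _
        simp only [Function.comp_apply]
        ring
      rw [hrow, List.map_map]
      apply List.map_congr_left
      intro j hj
      rw [PySem.List.mem_pyRange_one] at hj
      have hdiv : PySem.Int.floordiv ((m : Int) * Y + (j - 1)) Y = (m : Int) := by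
        rw [PySem.Int.floordiv_eq_iff_of_pos hY]
        constructor <;> nlinarith
      have hmod : PySem.Int.mod ((m : Int) * Y + (j - 1)) Y = j - 1 := by
        have := PySem.Int.floordiv_mul_add_mod ((m : Int) * Y + (j - 1)) Y
        rw [hdiv] at this; omega
      simp only [Function.comp, hdiv, hmod]
      have e1 : (m : Int) + 1 = 1 + (m : Int) := by ring
      have e2 : j - 1 + 1 = j := by ring
      have e3 : (m : Int) * Y + (j - 1) = (1 + (m : Int) - 1) * Y + (j - 1) := by ring
      rw [e1, e2, e3]

-- ===== VERDICT =====
theorem get_simple_grid_spec : Claim_equal_get_simple_grid := by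
  intro X Y _
  unfold Spec_get_simple_grid get_simple_grid get_simple_grid_alt
  by_cases hY : Y ≤ 0
  · rw [PySem.List.pyRange_one_eq_nil (by omega : Y + 1 ≤ 1)]
    simp [List.foldl_fixed, hY]
  · by_cases hX : X ≤ 0
    · rw [PySem.List.pyRange_one_eq_nil (by omega : X + 1 ≤ 1)]
      simp [hX]
    · have hif : (decide (X ≤ 0) || decide (Y ≤ 0)) = false := by
        simp [hX, hY]
      rw [if_neg (by simp [hX, hY])]
      have hX1 : X + 1 = 1 + (X.toNat : Nat) := by omega
      rw [hX1, pv_outer Y (by omega) X.toNat 1 0 []]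
      rw [pv_flat_map]
      have hXY : X * Y = (X.toNat : Int) * Y := by
        rw [Int.toNat_of_nonneg (by omega : (0:Int) ≤ X)]
      rw [hXY, pv_flat Y (by omega) X.toNat]
      simp only [List.nil_append]
      congr 1
      funext i
      apply List.map_congr_left
      intro j _
      have h : 0 + (i - 1) * Y + (j - 1) = (i - 1) * Y + (j - 1) := by ring
      rw [h]
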